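-- pv_equiv track=rewrite | github.com/Ryles1/AdventofCode | 2016/day3.py | parse_part2
-- ===== SOURCE A (Python) =====
-- def parse_part2(lines):
--     triangles = []
--     tri1, tri2, tri3 = [], [], []
--     for line in lines:
--         e1, e2, e3 = line
--         tri1.append(e1)
--         tri2.append(e2)
--         tri3.append(e3)
--         if len(tri1) == 3:
--             triangles.extend([tri1, tri2, tri3])
--             tri1, tri2, tri3 = [], [], []
--     return triangles
-- ===== SOURCE B (Python) =====
-- def parse_part2(lines):
--     # gather phase: validate/unpack every line into a row tuple
--     rows = []
--     for line in lines:
--         e1, e2, e3 = line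
--         rows.append((e1, e2, e3))
--     # chunk-and-transpose phase: each complete block of 3 rows yields 3 column triangles
--     out = []
--     for i in range(0, len(rows) // 3 * 3, 3):
--         a, b, c = rows[i], rows[i + 1], rows[i + 2]
--         for j in range(3):
--             out.append([a[j], b[j], c[j]])
--     return out
-- ===== Notes on version B (the rewrite author's own statement) =====
-- stated objective: alternative
-- what changed: A interleaves accumulation and flushing of three partial columns in one stateful pass; B first materializes all unpacked rows, then iterates in blocks of three and transposes each block directly, with no partial-column state.
import Mathlib
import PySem

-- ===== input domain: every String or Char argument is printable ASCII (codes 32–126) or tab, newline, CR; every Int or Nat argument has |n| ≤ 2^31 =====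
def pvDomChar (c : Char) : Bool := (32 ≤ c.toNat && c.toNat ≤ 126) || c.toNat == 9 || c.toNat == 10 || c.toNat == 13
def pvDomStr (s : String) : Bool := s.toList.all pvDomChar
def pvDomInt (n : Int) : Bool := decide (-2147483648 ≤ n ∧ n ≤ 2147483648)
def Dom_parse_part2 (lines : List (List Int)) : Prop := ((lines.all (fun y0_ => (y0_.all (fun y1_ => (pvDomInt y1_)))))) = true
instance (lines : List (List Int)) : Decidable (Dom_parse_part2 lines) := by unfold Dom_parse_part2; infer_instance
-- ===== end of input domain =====

-- B replaces A's interleaved accumulate-and-flush pass (three partial column lists plus a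
-- flush-on-full check) by a gather phase followed by a chunk-of-3 transpose phase (objective: alternative).


-- ===== PORT A =====
-- the for loop of A as recursion over lines with state (triangles, tri1, tri2, tri3);
-- 'e1, e2, e3 = line' raises unless the row has length 3 (excluded by Pre_), so getD is exact there
def pvALoop (lines : List (List Int)) (triangles : List (List Int)) (t1 t2 t3 : List Int) : List (List Int) :=
  match lines with
  | [] => triangles
  | line :: rest =>
    let e1 := line.getD 0 0
    let e2 := line.getD 1 0
    let e3 := line.getD 2 0
    let t1' := t1 ++ [e1]
    let t2' := t2 ++ [e2]
    let t3' := t3 ++ [e3]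
    if t1'.length == 3 then
      pvALoop rest (triangles ++ [t1', t2', t3']) [] [] []
    else
      pvALoop rest triangles t1' t2' t3'

def parse_part2 (lines : List (List Int)) : List (List Int) :=
  pvALoop lines [] [] [] []

-- ===== PORT B =====
-- gather: every line unpacked to a row triple (exact on Pre_: rows of length 3)
def pvRowOf (line : List Int) : Int × Int × Int :=
  (line.getD 0 0, line.getD 1 0, line.getD 2 0)

-- blocks of three rows, each transposed into three column triangles; a trailing partial block is dropped
def pvChunk3 (rows : List (Int × Int × Int)) : List (List Int) :=
  match rows with
  | a :: b :: c :: rest =>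
      [a.1, b.1, c.1] :: [a.2.1, b.2.1, c.2.1] :: [a.2.2, b.2.2, c.2.2] :: pvChunk3 rest
  | _ => []

def parse_part2_alt (lines : List (List Int)) : List (List Int) :=
  pvChunk3 (lines.map pvRowOf)

-- ===== PRECONDITION & SPEC =====
-- Pre_ excludes rows whose length is not 3: there 'e1, e2, e3 = line' raises ValueError in both A and B.
def Pre_parse_part2 (lines : List (List Int)) : Prop :=
  (lines.all (fun l => l.length == 3)) = true
instance (lines : List (List Int)) : Decidable (Pre_parse_part2 lines) := by
  unfold Pre_parse_part2; infer_instance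

def pvWitness_parse_part2 : List (List Int) :=
  [[1, 2, 3], [4, 5, 6], [7, 8, 9], [10, 11, 12]]

def Spec_parse_part2 (lines : List (List Int)) (out : List (List Int)) : Prop := out = parse_part2_alt lines
instance (lines : List (List Int)) (out : List (List Int)) : Decidable (Spec_parse_part2 lines out) := by unfold Spec_parse_part2; infer_instance

-- ===== CLAIM (what is proved, stated in full; the proofs are below) =====
def Claim_equal_parse_part2 : Prop := ∀ (lines : List (List Int)), Dom_parse_part2 lines → Pre_parse_part2 lines → Spec_parse_part2 lines (parse_part2 lines)

-- ===== LEMMAS AND PROOFS =====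
theorem pvALoop_eq_chunk3 : ∀ (ls : List (List Int)) (acc : List (List Int)),
    pvALoop ls acc [] [] [] = acc ++ pvChunk3 (ls.map pvRowOf)
  | [], acc => by simp [pvALoop, pvChunk3]
  | [a], acc => by simp [pvALoop, pvChunk3]
  | [a, b], acc => by simp [pvALoop, pvChunk3]
  | a :: b :: c :: rest, acc => by
      simp [pvALoop, pvChunk3, pvRowOf, pvALoop_eq_chunk3 rest]

-- ===== VERDICT (by name: the statement is the Claim_ definition above) =====
theorem parse_part2_spec : Claim_equal_parse_part2 := by
  intro lines _ _
  unfold Spec_parse_part2 parse_part2 parse_part2_alt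
  simpa using pvALoop_eq_chunk3 lines []
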